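-- pv_equiv track=rewrite | github.com/holistic-ai/holisticai | src/holisticai/bias/mitigation/commons/disparate_impact_remover/_categorical_repairer.py | compute
-- ===== SOURCE A (Python) =====
-- from collections import defaultdict
--
-- def compute(data_dict, stratified_group_indices, all_stratified_groups):
--     """
--     Computes the stratified group data based on the given data dictionary, stratified group indices, and all stratified groups.
--
--     Paramters
--     ---------
--
--     data_dict: dict
--         A dictionary containing the data for each column.
--     stratified_group_indices: dict
--         A dictionary containing the indices of each stratified group.
--     all_stratified_groups: list
--         A list of all stratified groups.
--
--     Returns:
--         dict: A dictionary containing the stratified group data for each group and column.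
--     """
--     stratified_group_data = defaultdict(dict)
--     for group in all_stratified_groups:
--         for col_id, col_dict in data_dict.items():
--             indices = defaultdict(list)
--             for i in stratified_group_indices[group]:
--                 value = col_dict[i]
--                 indices[value].append(i)
--             stratified_col_values = sorted((occurs, val) for val, occurs in indices.items())
--             stratified_col_values.sort(key=lambda tup: tup[1])
--             stratified_group_data[group][col_id] = stratified_col_values
--     return stratified_group_data
-- ===== SOURCE B (Python) =====
-- from itertools import groupby
--
--
-- def compute(data_dict, stratified_group_indices, all_stratified_groups):
--     pairs_by_group = {}
--     for col_id, col_dict in data_dict.items():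
--         for group in dict.fromkeys(all_stratified_groups):
--             ordered = sorted(stratified_group_indices[group], key=lambda i: col_dict[i])
--             runs = [(list(run), value)
--                     for value, run in groupby(ordered, key=lambda i: col_dict[i])]
--             pairs_by_group.setdefault(group, []).append((col_id, runs))
--     return {group: dict(cols) for group, cols in pairs_by_group.items()}
-- ===== Notes on version B (the rewrite author's own statement) =====
-- stated objective: alternative
-- what changed: Per column B stably sorts the group's indices by value and forms consecutive runs with itertools.groupby (sort-then-scan) instead of A's defaultdict bucketing plus two sorts, and the outer loops are inverted: B iterates columns outermost over the distinct groups, accumulating (column, runs) pairs per group and assembling the nested dicts at the end.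
import Mathlib
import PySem

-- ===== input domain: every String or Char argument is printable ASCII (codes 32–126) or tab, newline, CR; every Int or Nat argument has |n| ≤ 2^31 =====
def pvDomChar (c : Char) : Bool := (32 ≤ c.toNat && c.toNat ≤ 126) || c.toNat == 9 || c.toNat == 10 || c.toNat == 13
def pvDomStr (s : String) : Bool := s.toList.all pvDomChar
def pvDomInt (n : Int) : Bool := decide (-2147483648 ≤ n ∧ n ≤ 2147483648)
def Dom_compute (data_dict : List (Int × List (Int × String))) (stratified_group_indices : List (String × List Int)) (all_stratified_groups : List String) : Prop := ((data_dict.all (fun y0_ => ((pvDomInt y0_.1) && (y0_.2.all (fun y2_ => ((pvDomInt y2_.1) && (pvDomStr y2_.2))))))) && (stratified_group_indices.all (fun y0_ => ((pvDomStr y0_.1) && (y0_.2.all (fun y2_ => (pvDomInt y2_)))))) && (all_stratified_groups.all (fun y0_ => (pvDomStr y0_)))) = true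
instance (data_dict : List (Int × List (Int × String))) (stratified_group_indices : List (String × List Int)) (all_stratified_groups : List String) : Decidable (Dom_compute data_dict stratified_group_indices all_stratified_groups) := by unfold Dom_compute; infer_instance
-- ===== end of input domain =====

-- B replaces A's per-column defaultdict bucketing plus two sorts by a single stable sort of the
-- indices followed by an itertools.groupby scan, and inverts the two outer loops: column-major
-- accumulation of (column, runs) pairs per distinct group, assembled into the nested dicts at the
-- end (objective: alternative; not measured faster).

-- col_dict[i]; the KeyError case (i missing) is excluded by Pre_, where Python would raise
def pvLookup (cd : List (Int × String)) (i : Int) : String := PySem.Dict.getD (PySem.Dict.mk cd) i ""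

-- ===== PORT A =====
-- A's two inner loops for one column: bucket indices by value into a defaultdict(list),
-- then sort the (occurs, val) pairs twice
def pvColA (cd : List (Int × String)) (idxs : List Int) : List (List Int × String) :=
  let indices : PySem.Dict String (List Int) :=
    idxs.foldl (fun d i => d.modify (pvLookup cd i) [] (fun l => l ++ [i])) PySem.Dict.empty
  let pairs := indices.items.map (fun p => (p.2, p.1))
  PySem.List.sorted (PySem.List.sorted2 pairs (fun t => t.1) (fun t => t.2)) (fun t => t.2)

def compute (data_dict : List (Int × List (Int × String))) (stratified_group_indices : List (String × List Int)) (all_stratified_groups : List String) : List (String × List (Int × List (List Int × String))) :=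
  (all_stratified_groups.foldl (fun sgd group =>
      data_dict.foldl (fun sgd p =>
        sgd.modify group PySem.Dict.empty (fun inner =>
          inner.insert p.1
            (pvColA p.2 (PySem.Dict.getD (PySem.Dict.mk stratified_group_indices) group [])))) sgd)
    (PySem.Dict.empty : PySem.Dict String (PySem.Dict Int (List (List Int × String))))).items.map
    (fun p => (p.1, p.2.items))

-- ===== PORT B =====
-- itertools.groupby(l, key=f) with each run materialised as a list: leading run, then the rest
def pvGroupby (f : Int → String) : List Int → List (List Int × String)
  | [] => []
  | x :: xs =>
      (x :: xs.takeWhile (fun i => f i == f x), f x) ::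
        pvGroupby f (xs.dropWhile (fun i => f i == f x))
  termination_by l => l.length
  decreasing_by
    exact Nat.lt_succ_of_le (List.length_dropWhile_le _ _)

-- one column in B: stable sort of the indices by value, then group consecutive runs
def pvColB (cd : List (Int × String)) (idxs : List Int) : List (List Int × String) :=
  pvGroupby (pvLookup cd) (PySem.List.sorted idxs (pvLookup cd) false)

-- B: column-major accumulation; dict.fromkeys = PySem.List.dedup; result.setdefault(g, []).append
-- is Dict.modify with list append; the final dict(cols) per group is PySem.Dict.ofList
def compute_alt (data_dict : List (Int × List (Int × String))) (stratified_group_indices : List (String × List Int)) (all_stratified_groups : List String) : List (String × List (Int × List (List Int × String))) :=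
  (data_dict.foldl (fun acc p =>
      (PySem.List.dedup all_stratified_groups).foldl (fun acc group =>
        acc.modify group [] (fun l =>
          l ++ [(p.1, pvColB p.2 (PySem.Dict.getD (PySem.Dict.mk stratified_group_indices) group []))])) acc)
    (PySem.Dict.empty : PySem.Dict String (List (Int × List (List Int × String))))).items.map
    (fun q => (q.1, (PySem.Dict.ofList q.2).items))

-- ===== PRECONDITION & SPEC =====
-- Pre_ excludes inputs where the Python A raises KeyError (a group absent from
-- stratified_group_indices, or a group index absent from a column dict, both under the
-- first-binding-wins reading of an association list), and data_dict association lists with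
-- duplicate column keys, which do not determine a Python dict (A as Python iterates each
-- column once; the list port would visit the duplicate).
def Pre_compute (data_dict : List (Int × List (Int × String))) (stratified_group_indices : List (String × List Int)) (all_stratified_groups : List String) : Prop :=
  (data_dict.map (·.1)).Nodup ∧
  (data_dict = [] ∨ ∀ g ∈ all_stratified_groups, g ∈ stratified_group_indices.map (·.1)) ∧
  (∀ p ∈ data_dict, ∀ g ∈ all_stratified_groups,
      ∀ i ∈ PySem.Dict.getD (PySem.Dict.mk stratified_group_indices) g [], i ∈ p.2.map (·.1))
instance (data_dict : List (Int × List (Int × String))) (stratified_group_indices : List (String × List Int)) (all_stratified_groups : List String) : Decidable (Pre_compute data_dict stratified_group_indices all_stratified_groups) := by unfold Pre_compute; infer_instance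
def pvWitness_compute : (List (Int × List (Int × String))) × (List (String × List Int)) × List String :=
  ([(0, [(0, "a"), (1, "b")])], [("g", [0, 1])], ["g"])

def Spec_compute (data_dict : List (Int × List (Int × String))) (stratified_group_indices : List (String × List Int)) (all_stratified_groups : List String) (out : List (String × List (Int × List (List Int × String)))) : Prop := out = compute_alt data_dict stratified_group_indices all_stratified_groups
instance (data_dict : List (Int × List (Int × String))) (stratified_group_indices : List (String × List Int)) (all_stratified_groups : List String) (out : List (String × List (Int × List (List Int × String)))) : Decidable (Spec_compute data_dict stratified_group_indices all_stratified_groups out) := by unfold Spec_compute; infer_instance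

-- ===== CLAIM (what is proved, stated in full; the proofs are below) =====
def Claim_equal_compute : Prop := ∀ (data_dict : List (Int × List (Int × String))) (stratified_group_indices : List (String × List Int)) (all_stratified_groups : List String), Dom_compute data_dict stratified_group_indices all_stratified_groups → Pre_compute data_dict stratified_group_indices all_stratified_groups → Spec_compute data_dict stratified_group_indices all_stratified_groups (compute data_dict stratified_group_indices all_stratified_groups)

-- ===== LEMMAS AND PROOFS =====

-- the canonical value both column computations equal: for each distinct value in ascending
-- order, the pair (indices carrying that value, in original order; the value)
def pvBkt (f : Int → String) (idxs : List Int) (v : String) : List Int :=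
  idxs.filter (fun i => f i == v)

def pvSvals (f : Int → String) (idxs : List Int) : List String :=
  PySem.List.sorted (PySem.Set.ofList (idxs.map f)) (fun v => v) false

def pvCanon (f : Int → String) (idxs : List Int) : List (List Int × String) :=
  (pvSvals f idxs).map (fun v => (pvBkt f idxs v, v))

theorem pvSvals_pairwise (f : Int → String) (idxs : List Int) :
    (pvSvals f idxs).Pairwise (· < ·) :=
  PySem.List.sorted_ofList_pairwise_lt (idxs.map f)

theorem pvSvals_nodup (f : Int → String) (idxs : List Int) : (pvSvals f idxs).Nodup :=
  (pvSvals_pairwise f idxs).imp ne_of_lt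

theorem pvMem_svals (f : Int → String) (idxs : List Int) (v : String) :
    v ∈ pvSvals f idxs ↔ v ∈ idxs.map f := by
  unfold pvSvals
  rw [PySem.List.mem_sorted, PySem.Set.mem_ofList]

theorem pvBkt_ne_nil (f : Int → String) (idxs : List Int) (v : String)
    (hv : v ∈ pvSvals f idxs) : pvBkt f idxs v ≠ [] := by
  rw [pvMem_svals] at hv
  rcases List.mem_map.mp hv with ⟨i, hi, rfl⟩
  exact List.ne_nil_of_mem (List.mem_filter.mpr ⟨hi, by simp⟩)

theorem pvBkt_key (f : Int → String) (idxs : List Int) (v : String) :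
    ∀ i ∈ pvBkt f idxs v, f i = v := by
  intro i hi
  simpa using (List.mem_filter.mp hi).2

-- ===== A-side: bucketing plus two sorts equals pvCanon =====

theorem pvColA_canon (cd : List (Int × String)) (idxs : List Int) :
    pvColA cd idxs = pvCanon (pvLookup cd) idxs := by
  set f := pvLookup cd with hf
  show PySem.List.sorted (PySem.List.sorted2
      (((idxs.foldl (fun d i => d.modify (f i) [] (fun l => l ++ [i])) PySem.Dict.empty).items).map
        (fun p => (p.2, p.1))) (fun t => t.1) (fun t => t.2)) (fun t => t.2) = pvCanon f idxs
  set D := idxs.foldl (fun d i => d.modify (f i) [] (fun l => l ++ [i]))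
      (PySem.Dict.empty : PySem.Dict String (List Int)) with hD
  have hkeys : D.keys = PySem.Set.ofList (idxs.map f) := by
    rw [hD, PySem.Dict.keys_foldl_modify_key, PySem.Dict.keys_empty, PySem.Set.update_nil_left]
  have hnd : D.keys.Nodup := by
    rw [hD]
    exact PySem.Dict.nodup_keys_foldl_modify_key _ _ _ _ _ (by simp)
  have hgetD : ∀ v, D.getD v [] = pvBkt f idxs v := by
    intro v
    have hmap : List.foldl (fun d i => d.modify (f i) [] fun l => l ++ [i])
        (PySem.Dict.empty : PySem.Dict String (List Int)) idxs
        = List.foldl (fun (d : PySem.Dict String (List Int)) (p : String × Int) =>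
            d.modify p.1 [] (fun l => l ++ [p.2])) PySem.Dict.empty (idxs.map (fun i => (f i, i))) := by
      rw [List.foldl_map]
    rw [hD, hmap, PySem.Dict.getD_foldl_modify_append, PySem.Dict.getD_empty]
    simp [pvBkt, List.filter_map, Function.comp_def]
  have hitems : D.items = (PySem.Set.ofList (idxs.map f)).map (fun v => (v, pvBkt f idxs v)) := by
    rw [PySem.Dict.items_eq_map_keys D hnd []]
    rw [hkeys]
    exact List.map_congr_left (fun v hv => by rw [hgetD])
  apply PySem.List.sorted_eq_of_perm_of_pairwise_lt
  · -- pvCanon f idxs ~ sorted2 pairs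
    refine List.Perm.trans ?_ (PySem.List.sorted2_perm _ _ _ _).symm
    rw [hitems]
    rw [List.map_map]
    exact ((PySem.List.sorted_perm _ _ _).map _)
  · -- pairwise strictly increasing on .2
    refine List.pairwise_map.mpr ?_
    have := PySem.List.sorted_ofList_pairwise_lt (idxs.map f)
    exact this.imp (fun h => h)

-- ===== B-side: stable sort plus groupby equals pvCanon =====

theorem pvFilter_insertBy (f : Int → String) (v : String) (x : Int) :
    ∀ l : List Int, l.Pairwise (fun a b => f a ≤ f b) →
    (PySem.List.insertBy (fun a b => decide (f a < f b)) x l).filter (fun i => f i == v)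
      = l.filter (fun i => f i == v) ++ if f x == v then [x] else [] := by
  intro l
  induction l with
  | nil => intro _; simp [PySem.List.insertBy, List.filter_cons]
  | cons y ys ih =>
    intro hp
    rw [List.pairwise_cons] at hp
    rw [PySem.List.insertBy]
    by_cases h : f x < f y
    · simp only [h, decide_true, if_true]
      by_cases hv : f x = v
      · have hys : List.filter (fun i => f i == v) (y :: ys) = [] := by
          apply List.filter_eq_nil_iff.mpr
          intro a ha
          have hya : f y ≤ f a := by
            rcases List.mem_cons.mp ha with rfl | ha'
            · exact le_refl _
            · exact hp.1 a ha'
          simp only [beq_iff_eq]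
          intro hav
          have hxa : f x = f a := by rw [hv, hav]
          exact absurd (lt_of_lt_of_le h hya) (by rw [hxa]; exact lt_irrefl _)
        rw [List.filter_cons_of_pos (by simp [hv]), hys]
        simp [hv]
      · rw [List.filter_cons_of_neg (by simp [hv])]
        simp [hv]
    · simp only [h, decide_false, Bool.false_eq_true, if_false]
      rw [List.filter_cons, List.filter_cons, ih hp.2]
      split <;> simp

theorem pvSorted_append_singleton (f : Int → String) (xs : List Int) (x : Int) :
    PySem.List.sorted (xs ++ [x]) f false
      = PySem.List.insertBy (fun a b => decide (f a < f b)) x (PySem.List.sorted xs f false) := by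
  rw [PySem.List.sorted_eq_foldl_insertBy, PySem.List.sorted_eq_foldl_insertBy, List.foldl_append]
  rfl

-- stability of Python's sort, in filter form
theorem pvSorted_filter (f : Int → String) (idxs : List Int) (v : String) :
    (PySem.List.sorted idxs f false).filter (fun i => f i == v)
      = idxs.filter (fun i => f i == v) := by
  induction idxs using List.reverseRecOn with
  | nil => rfl
  | append_singleton xs x ih =>
    rw [pvSorted_append_singleton, pvFilter_insertBy f v x _ (PySem.List.sorted_pairwise _ _),
      ih, List.filter_append, List.filter_cons]
    split <;> simp

-- a key-sorted list is determined by its per-key filters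
theorem pvEq_of_filters (f : Int → String) :
    ∀ l1 l2 : List Int, l1.Pairwise (fun a b => f a ≤ f b) → l2.Pairwise (fun a b => f a ≤ f b) →
    (∀ v, l1.filter (fun i => f i == v) = l2.filter (fun i => f i == v)) → l1 = l2 := by
  intro l1
  induction l1 with
  | nil =>
    intro l2 _ _ h
    cases l2 with
    | nil => rfl
    | cons b t2 =>
      have := h (f b)
      rw [List.filter_nil, List.filter_cons_of_pos (by simp)] at this
      exact absurd this.symm (List.cons_ne_nil _ _)
  | cons a t1 ih =>
    intro l2 hp1 hp2 h
    cases l2 with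
    | nil =>
      have := h (f a)
      rw [List.filter_nil, List.filter_cons_of_pos (by simp)] at this
      exact absurd this (List.cons_ne_nil _ _)
    | cons b t2 =>
      rw [List.pairwise_cons] at hp1 hp2
      have hab : f a = f b := by
        rcases lt_trichotomy (f a) (f b) with hlt | heq | hgt
        · exfalso
          have h2 : List.filter (fun i => f i == f a) (b :: t2) = [] := by
            apply List.filter_eq_nil_iff.mpr
            intro c hc
            have hbc : f b ≤ f c := by
              rcases List.mem_cons.mp hc with rfl | hc'
              · exact le_refl _
              · exact hp2.1 c hc'
            simp only [beq_iff_eq]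
            intro hca
            rw [hca] at hbc
            exact absurd (lt_of_lt_of_le hlt hbc) (lt_irrefl _)
          have := h (f a)
          rw [h2, List.filter_cons_of_pos (by simp)] at this
          exact absurd this (List.cons_ne_nil _ _)
        · exact heq
        · exfalso
          have h1 : List.filter (fun i => f i == f b) (a :: t1) = [] := by
            apply List.filter_eq_nil_iff.mpr
            intro c hc
            have hac : f a ≤ f c := by
              rcases List.mem_cons.mp hc with rfl | hc'
              · exact le_refl _
              · exact hp1.1 c hc'
            simp only [beq_iff_eq]
            intro hcb
            rw [hcb] at hac
            exact absurd (lt_of_lt_of_le hgt hac) (lt_irrefl _)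
          have := h (f b)
          rw [h1, List.filter_cons_of_pos (by simp)] at this
          exact absurd this.symm (List.cons_ne_nil _ _)
      have hfa := h (f a)
      rw [List.filter_cons_of_pos (by simp), List.filter_cons_of_pos (by simp [hab])] at hfa
      have hba : a = b := (List.cons.injEq _ _ _ _).mp hfa |>.1
      subst hba
      have htails : ∀ v, t1.filter (fun i => f i == v) = t2.filter (fun i => f i == v) := by
        intro v
        have hv := h v
        by_cases hva : f a = v
        · rw [List.filter_cons_of_pos (by simp [hva]), List.filter_cons_of_pos (by simp [hva])] at hv
          exact (List.cons.injEq _ _ _ _).mp hv |>.2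
        · rwa [List.filter_cons_of_neg (by simp [hva]), List.filter_cons_of_neg (by simp [hva])] at hv
      exact congrArg (a :: ·) (ih t2 hp1.2 hp2.2 htails)

theorem pvFlatMap_pairwise (f : Int → String) (idxs : List Int) :
    ∀ vs : List String, vs.Pairwise (· < ·) →
    (vs.flatMap (pvBkt f idxs)).Pairwise (fun a b => f a ≤ f b) := by
  intro vs
  induction vs with
  | nil => intro _; simp
  | cons v vs' ih =>
    intro hp
    rw [List.pairwise_cons] at hp
    rw [List.flatMap_cons]
    apply List.pairwise_append.mpr
    refine ⟨?_, ih hp.2, ?_⟩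
    · -- within a bucket all keys are equal
      have hall : ∀ i ∈ pvBkt f idxs v, f i = v := by
        intro i hi; simpa using (List.mem_filter.mp hi).2
      apply List.pairwise_iff_forall_sublist.mpr
      intro a b hs
      have hm := hs.subset
      rw [hall a (hm (by simp)), hall b (hm (by simp))]
    · intro a ha b hb
      have hfa : f a = v := by simpa using (List.mem_filter.mp ha).2
      rcases List.mem_flatMap.mp hb with ⟨w, hw, hbw⟩
      have hfb : f b = w := by simpa using (List.mem_filter.mp hbw).2
      rw [hfa, hfb]
      exact le_of_lt (hp.1 w hw)

theorem pvFlatMap_filter (f : Int → String) (idxs : List Int) (v : String) :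
    ((pvSvals f idxs).flatMap (pvBkt f idxs)).filter (fun i => f i == v)
      = idxs.filter (fun i => f i == v) := by
  by_cases hv : v ∈ pvSvals f idxs
  · -- helper induction over a Nodup list containing v
    have main : ∀ vs : List String, vs.Nodup → v ∈ vs →
        ((vs.flatMap (pvBkt f idxs)).filter (fun i => f i == v)) = pvBkt f idxs v := by
      intro vs
      induction vs with
      | nil => intro _ h; cases h
      | cons w vs' ih =>
        intro hnd hm
        rw [List.nodup_cons] at hnd
        rw [List.flatMap_cons, List.filter_append]
        by_cases hwv : w = v
        · subst hwv
          have h1 : (pvBkt f idxs w).filter (fun i => f i == w) = pvBkt f idxs w := by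
            apply List.filter_eq_self.mpr
            intro i hi
            exact (List.mem_filter.mp hi).2
          have h2 : ((vs'.flatMap (pvBkt f idxs)).filter (fun i => f i == w)) = [] := by
            apply List.filter_eq_nil_iff.mpr
            intro i hi
            rcases List.mem_flatMap.mp hi with ⟨u, hu, hiu⟩
            have : f i = u := by simpa using (List.mem_filter.mp hiu).2
            simp only [beq_iff_eq, this]
            intro huw
            exact hnd.1 (huw ▸ hu)
          rw [h1, h2, List.append_nil]
        · have h1 : (pvBkt f idxs w).filter (fun i => f i == v) = [] := by
            apply List.filter_eq_nil_iff.mpr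
            intro i hi
            have : f i = w := by simpa using (List.mem_filter.mp hi).2
            simp [this, hwv]
          rw [h1, List.nil_append]
          exact ih hnd.2 ((List.mem_cons.mp hm).resolve_left (fun h => hwv h.symm))
    rw [main _ (pvSvals_nodup f idxs) hv]
    rfl
  · -- v is not a value at all: both sides empty
    have h1 : ((pvSvals f idxs).flatMap (pvBkt f idxs)).filter (fun i => f i == v) = [] := by
      apply List.filter_eq_nil_iff.mpr
      intro i hi
      rcases List.mem_flatMap.mp hi with ⟨u, hu, hiu⟩
      have : f i = u := by simpa using (List.mem_filter.mp hiu).2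
      simp only [beq_iff_eq, this]
      intro huv
      exact hv (huv ▸ hu)
    have h2 : idxs.filter (fun i => f i == v) = [] := by
      apply List.filter_eq_nil_iff.mpr
      intro i hi
      simp only [beq_iff_eq]
      intro hiv
      exact hv ((pvMem_svals f idxs v).mpr (List.mem_map.mpr ⟨i, hi, hiv⟩))
    rw [h1, h2]

theorem pvSorted_eq_flatMap (f : Int → String) (idxs : List Int) :
    PySem.List.sorted idxs f false = (pvSvals f idxs).flatMap (pvBkt f idxs) := by
  apply pvEq_of_filters f
  · exact PySem.List.sorted_pairwise _ _
  · exact pvFlatMap_pairwise f idxs _ (pvSvals_pairwise f idxs)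
  · intro v
    rw [pvSorted_filter, pvFlatMap_filter]


theorem pvTakeDrop_append {p : Int → Bool} :
    ∀ (t r : List Int), (∀ a ∈ t, p a = true) → (∀ a ∈ r, p a = false) →
    (t ++ r).takeWhile p = t ∧ (t ++ r).dropWhile p = r := by
  intro t
  induction t with
  | nil =>
    intro r _ hr
    cases r with
    | nil => simp
    | cons c r' =>
      simp only [List.nil_append]
      rw [List.takeWhile_cons, List.dropWhile_cons]
      simp [hr c (by simp)]
  | cons a t' ih =>
    intro r ht hr
    have hpa : p a = true := ht a (by simp)
    rw [List.cons_append, List.takeWhile_cons, List.dropWhile_cons]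
    simp only [hpa, if_true]
    have := ih r (fun b hb => ht b (by simp [hb])) hr
    exact ⟨by rw [this.1], by rw [this.2]⟩

theorem pvGroupby_buckets (f : Int → String) (g : String → List Int) :
    ∀ vs : List String, vs.Pairwise (· ≠ ·) →
    (∀ v ∈ vs, g v ≠ [] ∧ ∀ i ∈ g v, f i = v) →
    pvGroupby f (vs.flatMap g) = vs.map (fun v => (g v, v)) := by
  intro vs
  induction vs with
  | nil => intro _ _; simp [pvGroupby]
  | cons v vs' ih =>
    intro hp hb
    rw [List.pairwise_cons] at hp
    obtain ⟨hne, hkey⟩ := hb v (by simp)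
    obtain ⟨x, t, hxt⟩ := List.exists_cons_of_ne_nil hne
    have hfx : f x = v := hkey x (by rw [hxt]; simp)
    have hrest : ∀ a ∈ vs'.flatMap g, (f a == f x) = false := by
      intro a ha
      rcases List.mem_flatMap.mp ha with ⟨w, hw, haw⟩
      have : f a = w := (hb w (by simp [hw])).2 a haw
      simp only [beq_eq_false_iff_ne, this, hfx]
      exact fun h => hp.1 w hw h.symm
    have htkey : ∀ a ∈ t, (f a == f x) = true := by
      intro a ha
      simp [hkey a (by rw [hxt]; simp [ha]), hfx]
    rw [List.flatMap_cons, hxt, List.cons_append, pvGroupby]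
    have htd := pvTakeDrop_append t (vs'.flatMap g) htkey hrest
    rw [htd.1, htd.2, hfx, ← hxt, ih hp.2 (fun w hw => hb w (by simp [hw])), List.map_cons]

theorem pvColB_canon (cd : List (Int × String)) (idxs : List Int) :
    pvColB cd idxs = pvCanon (pvLookup cd) idxs := by
  unfold pvColB pvCanon
  rw [pvSorted_eq_flatMap]
  exact pvGroupby_buckets (pvLookup cd) (pvBkt (pvLookup cd) idxs) (pvSvals (pvLookup cd) idxs)
    ((pvSvals_pairwise _ _).imp ne_of_lt)
    (fun v hv => ⟨pvBkt_ne_nil _ _ _ hv, pvBkt_key _ _ _⟩)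

theorem pvCol_eq (cd : List (Int × String)) (idxs : List Int) :
    pvColA cd idxs = pvColB cd idxs := by
  rw [pvColA_canon, pvColB_canon]

-- ===== outer loop =====

-- insert of an already-present binding is a no-op
theorem pvInsert_mem_self {κ ν : Type} [BEq κ] [LawfulBEq κ] (d : PySem.Dict κ ν) (k : κ) (v : ν)
    (hnd : d.keys.Nodup) (hm : (k, v) ∈ d.items) : d.insert k v = d := by
  have hc : d.contains k = true := by
    rw [PySem.Dict.contains_iff_mem_keys]
    exact List.mem_map.mpr ⟨(k, v), hm, rfl⟩
  apply PySem.Dict.ext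
  rw [PySem.Dict.items_insert_of_contains _ _ hc]
  conv_rhs => rw [← List.map_id d.items]
  apply List.map_congr_left
  intro p hp
  by_cases hpk : p.1 = k
  · simp only [hpk, beq_self_eq_true, if_true]
    have h1 := PySem.Dict.get?_of_mem_items _ hm hnd
    have h2 := PySem.Dict.get?_of_mem_items _ (show (p.1, p.2) ∈ d.items by simpa using hp) hnd
    rw [hpk] at h2
    rw [h1] at h2
    have hv : p.2 = v := by injection h2 with h2'; exact h2'.symm
    rw [← hpk, ← hv]
    rfl
  · simp [hpk, id]

-- the per-group inner loop of A, rebracketed: one outer insert of the folded inner dict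
theorem pvFoldl_modify_insert (g : String)
    (F : Int × List (Int × String) → List (List Int × String)) :
    ∀ (dd : List (Int × List (Int × String))) (p0 : Int × List (Int × String))
      (D : PySem.Dict String (PySem.Dict Int (List (List Int × String)))),
     ((p0 :: dd).foldl (fun sgd p => sgd.modify g PySem.Dict.empty (fun inner => inner.insert p.1 (F p))) D)
      = D.insert g ((p0 :: dd).foldl (fun inner p => inner.insert p.1 (F p)) (D.getD g PySem.Dict.empty)) := by
  intro dd
  induction dd with
  | nil =>
    intro p0 D
    simp [PySem.Dict.modify]
  | cons q dd' ih =>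
    intro p0 D
    rw [List.foldl_cons, ih q _]
    rw [PySem.Dict.getD_modify_self]
    show (D.modify g PySem.Dict.empty _).insert g _ = _
    rw [PySem.Dict.modify, PySem.Dict.insert_insert_self]
    rfl

def pvGidx (sgi : List (String × List Int)) (g : String) : List Int :=
  PySem.Dict.getD (PySem.Dict.mk sgi) g []
def pvFullA (dd : List (Int × List (Int × String))) (gi : List Int) : List (Int × List (List Int × String)) :=
  dd.map (fun p => (p.1, pvColA p.2 gi))
def pvFullB (dd : List (Int × List (Int × String))) (gi : List Int) : List (Int × List (List Int × String)) :=
  dd.map (fun p => (p.1, pvColB p.2 gi))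
def pvAD (dd : List (Int × List (Int × String))) (sgi : List (String × List Int)) (gl : List String) :
    List (String × PySem.Dict Int (List (List Int × String))) :=
  gl.map (fun g => (g, PySem.Dict.mk (pvFullA dd (pvGidx sgi g))))
def pvBR (dd : List (Int × List (Int × String))) (sgi : List (String × List Int)) (gl : List String) :
    List (String × List (Int × List (List Int × String))) :=
  gl.map (fun g => (g, pvFullB dd (pvGidx sgi g)))

theorem pvInner_id (gi : List Int) :
    ∀ (sub : List (Int × List (Int × String))) (d : PySem.Dict Int (List (List Int × String))),
    d.keys.Nodup → (∀ p ∈ sub, (p.1, pvColA p.2 gi) ∈ d.items) →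
    sub.foldl (fun inner p => inner.insert p.1 (pvColA p.2 gi)) d = d := by
  intro sub
  induction sub with
  | nil => intro d _ _; rfl
  | cons q sub' ih =>
    intro d hnd hmem
    rw [List.foldl_cons, pvInsert_mem_self d q.1 (pvColA q.2 gi) hnd (hmem q (by simp))]
    exact ih d hnd (fun p hp => hmem p (by simp [hp]))

theorem pvLoop (dd : List (Int × List (Int × String))) (sgi : List (String × List Int))
    (hk : (dd.map (·.1)).Nodup) (p0 : Int × List (Int × String)) (dd' : List (Int × List (Int × String)))
    (hdd : dd = p0 :: dd') :
    ∀ (gs gl : List String), gl.Nodup →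
    ((gs.foldl (fun sgd group =>
        dd.foldl (fun sgd p => sgd.modify group PySem.Dict.empty (fun inner =>
          inner.insert p.1 (pvColA p.2 (pvGidx sgi group)))) sgd)
      (PySem.Dict.mk (pvAD dd sgi gl))).items.map (fun p => (p.1, p.2.items)))
    = gs.foldl (fun res group => if res.any (fun q => q.1 == group) then res
        else res ++ [(group, pvFullB dd (pvGidx sgi group))]) (pvBR dd sgi gl) := by
  intro gs
  induction gs with
  | nil =>
    intro gl _
    simp only [List.foldl_nil, pvAD, pvBR, List.map_map]
    apply List.map_congr_left
    intro g _
    simp only [Function.comp]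
    show (g, (PySem.Dict.mk (pvFullA dd (pvGidx sgi g))).items) = _
    show (g, dd.map fun p => (p.1, pvColA p.2 (pvGidx sgi g)))
        = (g, dd.map fun p => (p.1, pvColB p.2 (pvGidx sgi g)))
    exact congrArg _ (List.map_congr_left (fun p _ => by rw [pvCol_eq]))
  | cons g gs' ih =>
    intro gl hgl
    have hkeysD : (PySem.Dict.mk (pvAD dd sgi gl)).keys = gl := by
      simp [pvAD, PySem.Dict.keys, Function.comp_def]
    rw [List.foldl_cons, List.foldl_cons]
    rw [hdd, pvFoldl_modify_insert g (fun p => pvColA p.2 (pvGidx sgi g)) dd' p0 _, ← hdd]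
    by_cases hg : g ∈ gl
    · -- group seen before: A's state and B's list are both unchanged
      have hndD : (PySem.Dict.mk (pvAD dd sgi gl)).keys.Nodup := by rw [hkeysD]; exact hgl
      have hmem : (g, PySem.Dict.mk (pvFullA dd (pvGidx sgi g))) ∈ (PySem.Dict.mk (pvAD dd sgi gl)).items :=
        List.mem_map.mpr ⟨g, hg, rfl⟩
      have hget : (PySem.Dict.mk (pvAD dd sgi gl)).getD g PySem.Dict.empty
          = PySem.Dict.mk (pvFullA dd (pvGidx sgi g)) :=
        PySem.Dict.getD_of_mem_items _ hmem hndD PySem.Dict.empty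
      rw [hget]
      rw [pvInner_id (pvGidx sgi g) dd (PySem.Dict.mk (pvFullA dd (pvGidx sgi g)))
        (by simp only [pvFullA, PySem.Dict.keys, List.map_map]
            simpa [Function.comp_def] using hk)
        (fun p hp => by
          simp only [pvFullA]
          exact List.mem_map.mpr ⟨p, hp, rfl⟩)]
      rw [pvInsert_mem_self _ _ _ hndD hmem]
      have hb : (pvBR dd sgi gl).any (fun q => q.1 == g) = true := by
        simp only [List.any_eq_true]
        exact ⟨(g, pvFullB dd (pvGidx sgi g)), List.mem_map.mpr ⟨g, hg, rfl⟩, by simp⟩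
      rw [hb]
      simp only [if_true]
      exact ih gl hgl
    · -- fresh group: A appends (g, full dict), B appends (g, full list)
      have hcont : (PySem.Dict.mk (pvAD dd sgi gl)).contains g = false := by
        rcases Bool.eq_false_or_eq_true ((PySem.Dict.mk (pvAD dd sgi gl)).contains g) with hc | hc
        · exact absurd (hkeysD ▸ (PySem.Dict.contains_iff_mem_keys _ g).mp hc) hg
        · exact hc
      rw [PySem.Dict.getD_of_not_contains _ _ hcont]
      have hfresh : dd.foldl (fun inner p => inner.insert p.1 (pvColA p.2 (pvGidx sgi g)))
          (PySem.Dict.empty : PySem.Dict Int (List (List Int × String)))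
          = PySem.Dict.mk (pvFullA dd (pvGidx sgi g)) := by
        apply PySem.Dict.ext
        rw [PySem.Dict.items_foldl_insert_fresh dd (fun p => p.1) (fun p => pvColA p.2 (pvGidx sgi g)) PySem.Dict.empty (fun a _ => PySem.Dict.contains_empty a.1) hk]
        rfl
      rw [hfresh]
      have hins : (PySem.Dict.mk (pvAD dd sgi gl)).insert g (PySem.Dict.mk (pvFullA dd (pvGidx sgi g)))
          = PySem.Dict.mk (pvAD dd sgi (gl ++ [g])) := by
        apply PySem.Dict.ext
        rw [PySem.Dict.items_insert_of_not_contains _ _ hcont]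
        simp [pvAD]
      rw [hins]
      have hb : (pvBR dd sgi gl).any (fun q => q.1 == g) = false := by
        simp only [List.any_eq_false]
        intro q hq
        rcases List.mem_map.mp hq with ⟨w, hw, rfl⟩
        have hwg : w ≠ g := fun h => hg (h ▸ hw)
        simp [hwg]
      rw [hb]
      simp only [Bool.false_eq_true, if_false]
      have hbr : pvBR dd sgi gl ++ [(g, pvFullB dd (pvGidx sgi g))] = pvBR dd sgi (gl ++ [g]) := by
        simp [pvBR]
      rw [hbr]
      exact ih (gl ++ [g]) (by rw [List.nodup_append]; exact ⟨hgl, List.nodup_singleton g, fun a ha b hb hab => hg (by rw [← List.mem_singleton.mp hb, ← hab]; exact ha)⟩)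

theorem pvFoldl_const {α β : Type} (l : List β) (a : α) : l.foldl (fun x _ => x) a = a := by
  induction l with
  | nil => rfl
  | cons b t ih => exact ih

-- ===== B-side outer loop: column-major accumulation reaches the same closed form =====

theorem pvSkipfold_update (dd : List (Int × List (Int × String))) (sgi : List (String × List Int)) :
    ∀ (gs gl : List String),
    gs.foldl (fun res group => if res.any (fun q => q.1 == group) then res
        else res ++ [(group, pvFullB dd (pvGidx sgi group))]) (pvBR dd sgi gl)
      = pvBR dd sgi (PySem.Set.update gl gs) := by
  intro gs
  induction gs with
  | nil => intro gl; rfl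
  | cons g gs' ih =>
    intro gl
    rw [List.foldl_cons]
    by_cases hg : g ∈ gl
    · have hany : (pvBR dd sgi gl).any (fun q => q.1 == g) = true :=
        List.any_eq_true.mpr ⟨(g, pvFullB dd (pvGidx sgi g)), List.mem_map.mpr ⟨g, hg, rfl⟩, by simp⟩
      rw [hany]
      simp only [if_true]
      have : PySem.Set.update gl (g :: gs') = PySem.Set.update (PySem.Set.add gl g) gs' := rfl
      rw [this, PySem.Set.add_of_mem hg]
      exact ih gl
    · have hany : (pvBR dd sgi gl).any (fun q => q.1 == g) = false := by
        simp only [List.any_eq_false]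
        intro q hq
        rcases List.mem_map.mp hq with ⟨w, hw, rfl⟩
        have hwg : w ≠ g := fun h => hg (h ▸ hw)
        simp [hwg]
      rw [hany]
      simp only [Bool.false_eq_true, if_false]
      have hbr : pvBR dd sgi gl ++ [(g, pvFullB dd (pvGidx sgi g))] = pvBR dd sgi (gl ++ [g]) := by
        simp [pvBR]
      have hadd : PySem.Set.update gl (g :: gs') = PySem.Set.update (gl ++ [g]) gs' := by
        show PySem.Set.update (PySem.Set.add gl g) gs' = _
        have : PySem.Set.add gl g = gl ++ [g] := by
          simp [PySem.Set.add, PySem.Set.contains, hg]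
        rw [this]
      rw [hbr, hadd]
      exact ih (gl ++ [g])

theorem pvA_closed (dd : List (Int × List (Int × String))) (sgi : List (String × List Int))
    (hk : (dd.map (·.1)).Nodup) (p0 : Int × List (Int × String))
    (dd' : List (Int × List (Int × String))) (hdd : dd = p0 :: dd') (gs : List String) :
    compute dd sgi gs = pvBR dd sgi (PySem.Set.ofList gs) := by
  have h1 := pvLoop dd sgi hk p0 dd' hdd gs [] List.nodup_nil
  have h2 := pvSkipfold_update dd sgi gs []
  rw [PySem.Set.update_nil_left] at h2
  exact h1.trans h2

theorem pvUpdate_of_forall_mem {s : PySem.Set String} :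
    ∀ r : List String, (∀ x ∈ r, x ∈ s) → PySem.Set.update s r = s := by
  intro r
  induction r with
  | nil => intro _; rfl
  | cons x r' ih =>
    intro h
    show PySem.Set.update (PySem.Set.add s x) r' = s
    rw [PySem.Set.add_of_mem (h x (by simp))]
    exact ih (fun y hy => h y (by simp [hy]))

theorem pvFilter_map_nodup (b : String → Int × List (List Int × String)) :
    ∀ (D : List String) (g : String), D.Nodup → g ∈ D →
    (D.map (fun g' => (g', b g'))).filter (fun q => q.1 == g) = [(g, b g)] := by
  intro D
  induction D with
  | nil => intro g _ h; cases h
  | cons w D' ih =>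
    intro g hnd hm
    rw [List.nodup_cons] at hnd
    rw [List.map_cons, List.filter_cons]
    by_cases hw : w = g
    · subst hw
      simp only [beq_self_eq_true, if_true]
      have : (D'.map (fun g' => (g', b g'))).filter (fun q => q.1 == w) = [] := by
        apply List.filter_eq_nil_iff.mpr
        intro q hq
        rcases List.mem_map.mp hq with ⟨u, hu, rfl⟩
        have : u ≠ w := fun h => hnd.1 (h ▸ hu)
        simp [this]
      rw [this]
    · have hwv : ((w, b w).1 == g) = false := by simp [hw]
      rw [hwv]
      simp only [Bool.false_eq_true, if_false]
      exact ih g hnd.2 ((List.mem_cons.mp hm).resolve_left (fun h => hw h.symm))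

theorem pvOfList_items (l : List (Int × List (List Int × String)))
    (hnd : (l.map (·.1)).Nodup) : (PySem.Dict.ofList l).items = l := by
  show (l.foldl (fun acc p => acc.insert p.1 p.2) PySem.Dict.empty).items = l
  rw [PySem.Dict.items_foldl_insert_fresh l (fun p => p.1) (fun p => p.2) PySem.Dict.empty
    (fun a _ => PySem.Dict.contains_empty a.1) hnd]
  simp [PySem.Dict.empty]

theorem pvB_closed (dd : List (Int × List (Int × String))) (sgi : List (String × List Int))
    (hk : (dd.map (·.1)).Nodup) (p0 : Int × List (Int × String))
    (dd' : List (Int × List (Int × String))) (hdd : dd = p0 :: dd') (gs : List String) :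
    compute_alt dd sgi gs = pvBR dd sgi (PySem.Set.ofList gs) := by
  have hD : PySem.List.dedup gs = PySem.Set.ofList gs := PySem.List.dedup_eq_ofList gs
  set D := PySem.Set.ofList gs with hDdef
  have hDnd : D.Nodup := PySem.Set.nodup_ofList gs
  set b : String → Int × List (Int × String) → Int × List (List Int × String) :=
    fun g p => (p.1, pvColB p.2 (pvGidx sgi g)) with hb
  set T : List (String × (Int × List (List Int × String))) :=
    dd.flatMap (fun p => D.map (fun g => (g, b g p))) with hT
  have hflat : compute_alt dd sgi gs
      = (T.foldl (fun acc q => acc.modify q.1 [] (fun l => l ++ [q.2])) PySem.Dict.empty).items.map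
          (fun q => (q.1, (PySem.Dict.ofList q.2).items)) := by
    rw [hT, List.foldl_flatMap]
    simp only [List.foldl_map]
    rw [← hD]
    rfl
  have hkeys : (T.foldl (fun acc q => acc.modify q.1 [] (fun l => l ++ [q.2]))
      (PySem.Dict.empty : PySem.Dict String (List (Int × List (List Int × String))))).keys = D := by
    rw [PySem.Dict.keys_foldl_modify_key]
    rw [PySem.Dict.keys_empty, PySem.Set.update_nil_left]
    have hmap1 : T.map (·.1) = dd.flatMap (fun _ => D) := by
      rw [hT, List.map_flatMap]
      simp [List.map_map, Function.comp_def]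
    rw [hmap1, hdd, List.flatMap_cons]
    show PySem.Set.ofList (D ++ dd'.flatMap (fun _ => D)) = D
    have : PySem.Set.ofList (D ++ dd'.flatMap (fun _ => D))
        = PySem.Set.update (PySem.Set.ofList D) (dd'.flatMap (fun _ => D)) := by
      show List.foldl _ _ _ = _
      rw [List.foldl_append]
      rfl
    rw [this, PySem.Set.ofList_eq_self_of_nodup D hDnd]
    exact pvUpdate_of_forall_mem _ (fun x hx => by
      rcases List.mem_flatMap.mp hx with ⟨_, _, hxD⟩
      exact hxD)
  have hndk : (T.foldl (fun acc q => acc.modify q.1 [] (fun l => l ++ [q.2]))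
      (PySem.Dict.empty : PySem.Dict String (List (Int × List (List Int × String))))).keys.Nodup := by
    rw [hkeys]; exact hDnd
  have hgetD : ∀ g ∈ D, (T.foldl (fun acc q => acc.modify q.1 [] (fun l => l ++ [q.2]))
      (PySem.Dict.empty : PySem.Dict String (List (Int × List (List Int × String))))).getD g []
        = dd.map (b g) := by
    intro g hg
    rw [PySem.Dict.getD_foldl_modify_append, PySem.Dict.getD_empty, List.nil_append]
    have hfil : T.filter (fun q => q.1 == g) = dd.map (fun p => (g, b g p)) := by
      rw [hT, List.filter_flatMap]
      have : ∀ p, (D.map (fun g' => (g', b g' p))).filter (fun q => q.1 == g) = [(g, b g p)] :=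
        fun p => pvFilter_map_nodup (fun g' => b g' p) D g hDnd hg
      calc dd.flatMap (fun p => (D.map fun g => (g, b g p)).filter (fun q => q.1 == g))
          = dd.flatMap (fun p => [(g, b g p)]) := by
            exact List.flatMap_congr (fun p _ => this p)
        _ = dd.map (fun p => (g, b g p)) := Eq.symm List.map_eq_flatMap
    rw [hfil, List.map_map]
    rfl
  have hitems : (T.foldl (fun acc q => acc.modify q.1 [] (fun l => l ++ [q.2]))
      (PySem.Dict.empty : PySem.Dict String (List (Int × List (List Int × String))))).items
        = D.map (fun g => (g, dd.map (b g))) := by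
    rw [PySem.Dict.items_eq_map_keys _ hndk []]
    rw [hkeys]
    exact List.map_congr_left (fun g hg => by rw [hgetD g hg])
  rw [hflat, hitems, List.map_map]
  apply List.map_congr_left
  intro g _
  show (g, (PySem.Dict.ofList (dd.map (b g))).items) = (g, pvFullB dd (pvGidx sgi g))
  rw [pvOfList_items (dd.map (b g)) (by rw [List.map_map]; exact hk)]
  rfl

-- ===== VERDICT (by name: the statement is the Claim_ definition above) =====
theorem compute_spec : Claim_equal_compute := by
  intro data_dict stratified_group_indices all_stratified_groups _ hpre
  show compute _ _ _ = compute_alt _ _ _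
  cases hdd : data_dict with
  | nil =>
    subst hdd
    have hA : compute [] stratified_group_indices all_stratified_groups = [] := by
      show (all_stratified_groups.foldl (fun sgd _ => sgd)
        (PySem.Dict.empty : PySem.Dict String (PySem.Dict Int (List (List Int × String))))).items.map
          (fun p => (p.1, p.2.items)) = []
      rw [pvFoldl_const]
      rfl
    rw [hA]
    rfl
  | cons p0 dd' =>
    subst hdd
    rw [pvA_closed _ stratified_group_indices hpre.1 p0 dd' rfl,
      pvB_closed _ stratified_group_indices hpre.1 p0 dd' rfl]
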